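-- pv_equiv track=rewrite | github.com/zbmed-semtec/mlentory-etl-pipeline | code/extractors/mlentory_extract/ai4life_extract/AI4LifeExtractor.py | _group_records_by_type
-- ===== SOURCE A (Python) =====
-- from collections import Counter, defaultdict
-- from typing import Dict, Any, List, Optional, Tuple
--
-- def _group_records_by_type(data: List[Dict[str, Any]]) -> Tuple[Dict[str, List[Dict[str, Any]]], Dict[str, List[Dict[str, Any]]]]:
--     """Group records by type into known and unknown categories.
--
--     Args:
--         data (List[Dict[str, Any]]): List of records to group.
--
--     Returns:
--         Tuple[Dict[str, List[Dict[str, Any]]], Dict[str, List[Dict[str, Any]]]]: Known and unknown type records.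
--     """
--     known_types = {'application', 'model', 'dataset'}
--     known = defaultdict(list)
--     unknown = defaultdict(list)
--
--     for entry in data:
--         entry_type = (entry.get('type') or '').strip().lower()
--         if entry_type in known_types:
--             known[entry_type].append(entry)
--         else:
--             unknown[entry_type].append(entry)
--
--     return known, unknown
-- ===== SOURCE B (Python) =====
-- from collections import defaultdict
-- from typing import Dict, Any, List, Tuple
--
--
-- def _group_records_by_type(data: List[Dict[str, Any]]) -> Tuple[Dict[str, List[Dict[str, Any]]], Dict[str, List[Dict[str, Any]]]]:
--     """Group records by type into known and unknown categories.
--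
--     Collects the distinct normalized type keys in first-occurrence order,
--     then builds each bucket by comprehension, re-scanning data per key.
--     """
--     known_types = {'application', 'model', 'dataset'}
--
--     def norm(e):
--         return (e.get('type') or '').strip().lower()
--
--     keys = list(dict.fromkeys(norm(e) for e in data))
--     known = defaultdict(list, {k: [e for e in data if norm(e) == k]
--                                for k in keys if k in known_types})
--     unknown = defaultdict(list, {k: [e for e in data if norm(e) == k]
--                                  for k in keys if k not in known_types})
--     return known, unknown
-- ===== Notes on version B (the rewrite author's own statement) =====
-- stated objective: alternative
-- what changed: B first collects the distinct normalized type keys in first-occurrence order, then builds each bucket with a comprehension that re-filters the whole input per key, instead of routing record by record into paired defaultdicts inside one loop.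
import Mathlib
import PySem

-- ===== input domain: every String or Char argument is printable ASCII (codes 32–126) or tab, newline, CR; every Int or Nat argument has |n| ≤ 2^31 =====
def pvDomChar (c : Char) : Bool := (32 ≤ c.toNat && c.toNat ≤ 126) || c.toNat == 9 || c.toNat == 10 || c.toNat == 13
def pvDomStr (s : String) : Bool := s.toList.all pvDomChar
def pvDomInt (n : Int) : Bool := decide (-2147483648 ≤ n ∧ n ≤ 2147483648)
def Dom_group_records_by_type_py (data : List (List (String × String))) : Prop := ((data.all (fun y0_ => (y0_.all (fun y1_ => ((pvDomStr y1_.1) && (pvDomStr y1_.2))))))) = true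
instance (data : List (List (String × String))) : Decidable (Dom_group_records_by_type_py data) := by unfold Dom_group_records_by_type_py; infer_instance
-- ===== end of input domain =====

-- B collects the distinct normalized type keys first and then builds each bucket by
-- re-filtering the whole input per key, instead of routing record by record into
-- paired dicts inside one loop (objective: alternative algorithm; B is O(n*k), not faster).

-- ===== PORT A =====
-- the Python set literal {'application', 'model', 'dataset'}
def pvKnownTypes : PySem.Set String := ["application", "model", "dataset"]

-- (entry.get('type') or '').strip().lower()  — this expression appears verbatim in both Pythons
def pvNorm (e : List (String × String)) : String :=
  PySem.Str.lower (PySem.Str.strip (((PySem.Dict.mk e).get? "type").getD ""))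

def group_records_by_type_py (data : List (List (String × String))) : (List (String × List (List (String × String)))) × (List (String × List (List (String × String)))) :=
  let r := data.foldl
    (fun (st : PySem.Dict String (List (List (String × String))) × PySem.Dict String (List (List (String × String)))) e =>
      let t := pvNorm e
      if t ∈ pvKnownTypes then (st.1.modify t [] (· ++ [e]), st.2)
      else (st.1, st.2.modify t [] (· ++ [e])))
    (PySem.Dict.empty, PySem.Dict.empty)
  (r.1.items, r.2.items)

-- ===== PORT B =====
-- keys = list(dict.fromkeys(norm(e) for e in data)): distinct keys, first-occurrence order
def group_records_by_type_py_alt (data : List (List (String × String))) : (List (String × List (List (String × String)))) × (List (String × List (List (String × String)))) :=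
  let keys : List String := PySem.Set.ofList (data.map pvNorm)
  ((keys.filter (fun k => decide (k ∈ pvKnownTypes))).map
      (fun k => (k, data.filter (fun e => pvNorm e == k))),
   (keys.filter (fun k => decide (k ∉ pvKnownTypes))).map
      (fun k => (k, data.filter (fun e => pvNorm e == k))))

-- ===== PRECONDITION & SPEC =====
def Spec_group_records_by_type_py (data : List (List (String × String))) (out : (List (String × List (List (String × String)))) × (List (String × List (List (String × String))))) : Prop := out = group_records_by_type_py_alt data
instance (data : List (List (String × String))) (out : (List (String × List (List (String × String)))) × (List (String × List (List (String × String))))) : Decidable (Spec_group_records_by_type_py data out) := by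
  unfold Spec_group_records_by_type_py; exact instDecidableEqProd _ _

-- ===== CLAIM (what is proved, stated in full; the proofs are below) =====
def Claim_equal_group_records_by_type_py : Prop := ∀ (data : List (List (String × String))), Dom_group_records_by_type_py data → Spec_group_records_by_type_py data (group_records_by_type_py data)

-- ===== LEMMAS AND PROOFS =====

-- A's grouping loop restricted to one bucket: append e to the bucket of `key e`
def pvGroup {α ν : Type} (key : α → String) (app : α → List ν)
    (d : PySem.Dict String (List ν)) (l : List α) : PySem.Dict String (List ν) :=
  l.foldl (fun d e => d.modify (key e) [] (· ++ app e)) d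

-- A's routing fold over a pair of dicts is two independent grouping folds over the two filtered lists
theorem pvSplit {α ν : Type} (P : String → Prop) [DecidablePred P]
    (key : α → String) (app : α → List ν) (l : List α)
    (d₁ d₂ : PySem.Dict String (List ν)) :
    l.foldl (fun (st : PySem.Dict String (List ν) × PySem.Dict String (List ν)) e =>
        if P (key e) then (st.1.modify (key e) [] (· ++ app e), st.2)
        else (st.1, st.2.modify (key e) [] (· ++ app e))) (d₁, d₂)
      = (pvGroup key app d₁ (l.filter (fun e => decide (P (key e)))),
         pvGroup key app d₂ (l.filter (fun e => !decide (P (key e))))) := by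
  induction l generalizing d₁ d₂ with
  | nil => rfl
  | cons x xs ih =>
      by_cases h : P (key x) <;>
        simp [pvGroup, List.foldl_cons, h] at ih ⊢ <;> exact ih _ _

-- keys of a grouping fold are unique
theorem pvKeysNodup {α : Type} (key : α → String) (l : List α) :
    ((pvGroup key (fun e => [e]) PySem.Dict.empty l).items.map Prod.fst).Nodup := by
  have h := PySem.Dict.nodup_keys_foldl_modify_key l key [] (fun _ e v => v ++ [e])
      PySem.Dict.empty (by simp [PySem.Dict.keys_empty])
  simpa [PySem.Dict.keys, pvGroup] using h

-- the items of a grouping fold from empty: first-occurrence keys with their filtered buckets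
theorem pvGroup_items {α : Type} (key : α → String) (l : List α) :
    (pvGroup key (fun e => [e]) PySem.Dict.empty l).items
      = (PySem.Set.ofList (l.map key)).map
          (fun k => (k, l.filter (fun e => key e == k))) := by
  have hnd : (pvGroup key (fun e => [e]) PySem.Dict.empty l).keys.Nodup := by
    simpa [PySem.Dict.keys] using pvKeysNodup key l
  rw [PySem.Dict.items_eq_map_keys _ hnd []]
  have hkeys : (pvGroup key (fun e => [e]) PySem.Dict.empty l).keys
      = PySem.Set.ofList (l.map key) := by
    have h := PySem.Dict.keys_foldl_modify_key l key [] (fun _ e v => v ++ [e])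
        PySem.Dict.empty
    simpa [pvGroup, PySem.Dict.keys_empty, PySem.Set.ofList_eq_foldl, PySem.Set.update] using h
  rw [hkeys]
  apply List.map_congr_left
  intro k _
  congr 1
  have hfold : pvGroup key (fun e => [e]) PySem.Dict.empty l
      = (l.map (fun e => (key e, e))).foldl
          (fun d p => d.modify p.1 [] (· ++ [p.2])) PySem.Dict.empty := by
    simp [pvGroup, List.foldl_map]
  rw [hfold, PySem.Dict.getD_foldl_modify_append]
  simp [PySem.Dict.getD_empty, List.filter_map, Function.comp_def]

-- Set.ofList commutes with filter
theorem pvFoldAdd_filter (p : String → Bool) (xs s : List String) :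
    (xs.filter p).foldl PySem.Set.add (s.filter p)
      = (xs.foldl PySem.Set.add s).filter p := by
  induction xs generalizing s with
  | nil => rfl
  | cons x xs ih =>
      by_cases h : p x
      · have hx : PySem.Set.add (s.filter p) x = (PySem.Set.add s x).filter p := by
          by_cases hm : x ∈ s
          · rw [PySem.Set.add_of_mem hm, PySem.Set.add_of_mem (List.mem_filter.mpr ⟨hm, h⟩)]
          · rw [PySem.Set.add_of_not_mem hm,
              PySem.Set.add_of_not_mem (fun hc => hm (List.mem_filter.mp hc).1)]
            simp [List.filter_append, h]
        simp only [List.filter_cons_of_pos h, List.foldl_cons, hx]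
        exact ih _
      · have hx : (PySem.Set.add s x).filter p = s.filter p := by
          by_cases hm : x ∈ s
          · rw [PySem.Set.add_of_mem hm]
          · rw [PySem.Set.add_of_not_mem hm]; simp [List.filter_append, h]
        simp only [List.filter_cons_of_neg h, List.foldl_cons]
        simpa [hx] using ih (PySem.Set.add s x)

theorem pvOfList_filter (p : String → Bool) (xs : List String) :
    PySem.Set.ofList (xs.filter p) = (PySem.Set.ofList xs).filter p := by
  rw [PySem.Set.ofList_eq_foldl, PySem.Set.ofList_eq_foldl]
  simpa using pvFoldAdd_filter p xs []

-- one bucket of A is exactly B's filtered-keys comprehension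
theorem pvBucket {α : Type} (P : String → Prop) [DecidablePred P]
    (key : α → String) (l : List α) :
    (pvGroup key (fun e => [e]) PySem.Dict.empty
        (l.filter (fun e => decide (P (key e))))).items
      = ((PySem.Set.ofList (l.map key)).filter (fun k => decide (P k))).map
          (fun k => (k, l.filter (fun e => key e == k))) := by
  rw [pvGroup_items]
  have hmap : (l.filter (fun e => decide (P (key e)))).map key
      = (l.map key).filter (fun k => decide (P k)) := by
    simpa [Function.comp_def] using
      (List.filter_map (f := key) (p := fun k => decide (P k)) (l := l)).symm
  rw [hmap, pvOfList_filter]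
  apply List.map_congr_left
  intro k hk
  have hPk : P k := by
    have := (List.mem_filter.mp hk).2
    simpa using this
  congr 1
  rw [List.filter_filter]
  apply List.filter_congr
  intro e _
  by_cases h : key e = k
  · simp [h, hPk]
  · simp [h]

-- ===== VERDICT (by name: the statement is the Claim_ definition above) =====
theorem group_records_by_type_py_spec : Claim_equal_group_records_by_type_py := by
  intro data _
  unfold Spec_group_records_by_type_py
  show group_records_by_type_py data = group_records_by_type_py_alt data
  unfold group_records_by_type_py group_records_by_type_py_alt
  simp only []
  rw [pvSplit (fun t => t ∈ pvKnownTypes) pvNorm (fun e => [e]) data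
      PySem.Dict.empty PySem.Dict.empty]
  rw [Prod.mk.injEq]
  refine ⟨?_, ?_⟩
  · exact pvBucket (fun t => t ∈ pvKnownTypes) pvNorm data
  · have h := pvBucket (fun t => ¬ (t ∈ pvKnownTypes)) pvNorm data
    simpa using h
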